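-- pv_equiv track=rewrite | github.com/JosephByronLane/RecursivePathfinder | lab.py | find_trap_triggers
-- ===== SOURCE A (Python) =====
-- def find_trap_triggers(labyrinth, triggertraptiles):
--     aretheretrapsleft = True
--     valuefoundaux = False
--     temparr = []
--     c = 0
--     colcounter = 0
--
--     while (aretheretrapsleft) == True:
--         valuefoundaux = False
--         c += 1
--         colcounter += 1
--
--         for i in range(len(labyrinth)):
--             if valuefoundaux:
--                 break
--             for a in range(len(labyrinth[i])):
--                 if labyrinth[i][a] == ('S' + f'{c}'):
--                     temparr.append(i)
--                     temparr.append(a)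
--                     triggertraptiles.append(temparr)
--                     temparr = []
--                     aretheretrapsleft = True
--                     valuefoundaux = True
--                     break
--             if valuefoundaux == False:
--                 aretheretrapsleft = False
--     return triggertraptiles, c
-- ===== SOURCE B (Python) =====
-- def find_trap_triggers(labyrinth, triggertraptiles):
--     # One pass over the grid in REVERSE row-major order, overwriting: after the
--     # pass, first[cell] is the first (row-major) position of cell in the grid.
--     first = {}
--     for i, row in reversed(list(enumerate(labyrinth))):
--         for a, cell in reversed(list(enumerate(row))):
--             first[cell] = [i, a]
--     c = 1
--     while ('S' + str(c)) in first:
--         triggertraptiles.append(first['S' + str(c)])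
--         c += 1
--     return triggertraptiles, c
-- ===== Notes on version B (the rewrite author's own statement) =====
-- stated objective: alternative
-- what changed: A rescans the whole grid once per consecutive label S1,S2,...; B makes one reverse row-major grid pass into a dict (overwrite, so the first occurrence wins) and then consumes the labels by dict lookup until one is missing.
import Mathlib
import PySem

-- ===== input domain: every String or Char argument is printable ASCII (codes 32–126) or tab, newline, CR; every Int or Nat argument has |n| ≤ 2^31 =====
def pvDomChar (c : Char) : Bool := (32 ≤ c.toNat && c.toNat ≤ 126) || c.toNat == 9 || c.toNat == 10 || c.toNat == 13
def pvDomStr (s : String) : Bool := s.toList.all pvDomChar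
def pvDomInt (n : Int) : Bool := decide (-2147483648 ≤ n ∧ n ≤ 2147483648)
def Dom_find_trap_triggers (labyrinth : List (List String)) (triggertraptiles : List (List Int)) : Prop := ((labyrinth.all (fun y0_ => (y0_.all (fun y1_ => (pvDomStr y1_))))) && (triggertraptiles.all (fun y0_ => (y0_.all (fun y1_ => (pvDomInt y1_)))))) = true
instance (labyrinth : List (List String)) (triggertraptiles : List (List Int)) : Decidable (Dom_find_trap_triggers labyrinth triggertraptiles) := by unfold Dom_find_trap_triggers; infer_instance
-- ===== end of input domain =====

-- B replaces A's per-label full-grid rescan by one reverse row-major grid pass into a dict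
-- (overwrite, so the first occurrence wins) plus lookups until a label is missing; both
-- programs append the found positions to the triggertraptiles argument in Python (the
-- theorem here is about the returned value). No Pre_: both ports are total; on the empty
-- labyrinth (where Python A's while loop never terminates) the ports and Python B return
-- (triggertraptiles, 1).


-- ===== PORT A =====
-- inner 'for a in range(len(labyrinth[i]))' loop: first column index holding the label
def aFindCol (row : List String) (lab : String) (a : Int) : Option Int :=
  match row with
  | [] => none
  | x :: rest => if x == lab then some a else aFindCol rest lab (a + 1)

-- outer 'for i in range(len(labyrinth))' loop: first row-major position [i, a] of the label
def aFindRow (rows : List (List String)) (lab : String) (i : Int) : Option (List Int) :=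
  match rows with
  | [] => none
  | r :: rest =>
    match aFindCol r lab 0 with
    | some a => some [i, a]
    | none => aFindRow rest lab (i + 1)

-- the 'while aretheretrapsleft' loop; fuel = total number of cells + 1 is a totality guard:
-- each successful round consumes a distinct label present in the grid, so the first missing
-- label is reached within (cells + 1) rounds and the 0 case (which answers as a failing
-- round would, c already incremented) is never reached with the fuel the port supplies.
def aLoop (labyrinth : List (List String)) (tt : List (List Int)) (c : Int) : Nat → List (List Int) × Int
  | 0 => (tt, c + 1)
  | fuel + 1 =>
    let c' := c + 1
    match aFindRow labyrinth ("S" ++ PySem.Int.toStr c') 0 with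
    | some pos => aLoop labyrinth (tt ++ [pos]) c' fuel
    | none => (tt, c')

def find_trap_triggers (labyrinth : List (List String)) (triggertraptiles : List (List Int)) : List (List Int) × Int :=
  aLoop labyrinth triggertraptiles 0 ((labyrinth.map List.length).sum + 1)

-- ===== PORT B =====
-- 'for i, row in reversed(list(enumerate(labyrinth))): for a, cell in reversed(list(enumerate(row))): first[cell] = [i, a]'
def bBuild (labyrinth : List (List String)) : PySem.Dict String (List Int) :=
  (PySem.List.enumerate labyrinth 0).reverse.foldl
    (fun d p => (PySem.List.enumerate p.2 0).reverse.foldl (fun d q => d.insert q.2 [p.1, q.1]) d)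
    PySem.Dict.empty

-- "while ('S' + str(c)) in first: triggertraptiles.append(first['S' + str(c)]); c += 1";
-- same totality guard (cells + 1 rounds always suffice); the getD default is never used,
-- the subscript is guarded by the 'in' test.
def bLoop (d : PySem.Dict String (List Int)) (tt : List (List Int)) (c : Int) : Nat → List (List Int) × Int
  | 0 => (tt, c)
  | fuel + 1 =>
    if d.contains ("S" ++ PySem.Int.toStr c) then
      bLoop d (tt ++ [d.getD ("S" ++ PySem.Int.toStr c) []]) (c + 1) fuel
    else (tt, c)

def find_trap_triggers_alt (labyrinth : List (List String)) (triggertraptiles : List (List Int)) : List (List Int) × Int :=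
  bLoop (bBuild labyrinth) triggertraptiles 1 ((labyrinth.map List.length).sum + 1)

-- ===== PRECONDITION & SPEC =====
def Spec_find_trap_triggers (labyrinth : List (List String)) (triggertraptiles : List (List Int)) (out : List (List Int) × Int) : Prop := out = find_trap_triggers_alt labyrinth triggertraptiles
instance (labyrinth : List (List String)) (triggertraptiles : List (List Int)) (out : List (List Int) × Int) : Decidable (Spec_find_trap_triggers labyrinth triggertraptiles out) := by unfold Spec_find_trap_triggers; infer_instance

-- ===== CLAIM (what is proved, stated in full; the proofs are below) =====
def Claim_equal_find_trap_triggers : Prop := ∀ (labyrinth : List (List String)) (triggertraptiles : List (List Int)), Dom_find_trap_triggers labyrinth triggertraptiles → Spec_find_trap_triggers labyrinth triggertraptiles (find_trap_triggers labyrinth triggertraptiles)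

-- ===== LEMMAS AND PROOFS =====

-- one ROW of B's reverse pass, seen through get?: the overwrite in reverse order makes the
-- FIRST matching cell of the row win, i.e. exactly A's scan of that row
theorem bRow_get (row : List String) (d : PySem.Dict String (List Int)) (i n : Int) (s : String) :
    ((PySem.List.enumerate row n).reverse.foldl (fun d q => d.insert q.2 [i, q.1]) d).get? s
      = ((aFindCol row s n).map (fun a => [i, a])).or (d.get? s) := by
  induction row generalizing d n with
  | nil => simp [PySem.List.enumerate_nil, aFindCol]
  | cons x xs ih =>
    rw [PySem.List.enumerate_cons]
    simp only [List.reverse_cons, List.foldl_append, List.foldl_cons, List.foldl_nil]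
    rw [PySem.Dict.get?_insert, ih]
    by_cases hs : s = x
    · subst hs; simp [aFindCol]
    · have hx : (x == s) = false := by simpa using fun h => hs h.symm
      simp [hs, aFindCol, hx]

-- the whole reverse pass answers get? like A's full row-major scan
theorem bGrid_get (rows : List (List String)) (d : PySem.Dict String (List Int)) (n : Int) (s : String) :
    ((PySem.List.enumerate rows n).reverse.foldl
        (fun d p => (PySem.List.enumerate p.2 0).reverse.foldl (fun d q => d.insert q.2 [p.1, q.1]) d) d).get? s
      = (aFindRow rows s n).or (d.get? s) := by
  induction rows generalizing d n with
  | nil => simp [PySem.List.enumerate_nil, aFindRow]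
  | cons r rest ih =>
    rw [PySem.List.enumerate_cons]
    simp only [List.reverse_cons, List.foldl_append, List.foldl_cons, List.foldl_nil]
    rw [bRow_get, ih]
    cases h : aFindCol r s 0 <;> simp [aFindRow, h]

theorem grid_get (rows : List (List String)) (s : String) :
    (bBuild rows).get? s = aFindRow rows s 0 := by
  unfold bBuild; rw [bGrid_get]; simp [PySem.Dict.get?_empty]

-- A's search-and-append loop and B's lookup loop agree round for round
theorem loop_eq (labyrinth : List (List String)) (fuel : Nat) (tt : List (List Int)) (c : Int) :
    aLoop labyrinth tt c fuel = bLoop (bBuild labyrinth) tt (c + 1) fuel := by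
  induction fuel generalizing tt c with
  | zero => rfl
  | succ n ih =>
    rw [aLoop, bLoop, PySem.Dict.contains_eq_isSome_get?, grid_get]
    cases h : aFindRow labyrinth ("S" ++ PySem.Int.toStr (c + 1)) 0 with
    | none => simp
    | some pos =>
      simp only [Option.isSome_some, if_pos]
      rw [PySem.Dict.getD_eq_get?_getD, grid_get, h]
      exact ih (tt ++ [pos]) (c + 1)

-- ===== VERDICT (by name: the statement is the Claim_ definition above) =====
theorem find_trap_triggers_spec : Claim_equal_find_trap_triggers := by
  intro labyrinth triggertraptiles _
  unfold Spec_find_trap_triggers find_trap_triggers find_trap_triggers_alt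
  exact loop_eq labyrinth _ triggertraptiles 0
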